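-- pv_equiv track=rewrite | github.com/MarcelWiedenmann/crossmodality-dl | utils.py | aggregate_confusion_matrices
-- ===== SOURCE A (Python) =====
-- from typing import Any, Dict, List, Optional, Tuple, Union
--
-- def aggregate_confusion_matrices(
--     matrices: List[Tuple[int, int, int, int]]
-- ) -> Tuple[int, int, int, int]:
--     total_tn = 0
--     total_fp = 0
--     total_fn = 0
--     total_tp = 0
--     for tn, fp, fn, tp in matrices:
--         total_tn += tn
--         total_fp += fp
--         total_fn += fn
--         total_tp += tp
--     return total_tn, total_fp, total_fn, total_tp
-- ===== SOURCE B (Python) =====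
-- def aggregate_confusion_matrices(matrices):
--     # Divide and conquer: recursively split the index range in half and add
--     # the two partial 4-tuples componentwise.
--     def go(lo, hi):
--         if hi - lo == 0:
--             return (0, 0, 0, 0)
--         if hi - lo == 1:
--             tn, fp, fn, tp = matrices[lo]
--             return (tn, fp, fn, tp)
--         mid = (lo + hi) // 2
--         l = go(lo, mid)
--         r = go(mid, hi)
--         return (l[0] + r[0], l[1] + r[1], l[2] + r[2], l[3] + r[3])
--     return go(0, len(matrices))
-- ===== Notes on version B (the rewrite author's own statement) =====
-- stated objective: alternative
-- what changed: Replaces the single left-to-right loop with four running totals by a recursive divide-and-conquer: split the list in half, aggregate each half, and add the two partial 4-tuples componentwise.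
import Mathlib
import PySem

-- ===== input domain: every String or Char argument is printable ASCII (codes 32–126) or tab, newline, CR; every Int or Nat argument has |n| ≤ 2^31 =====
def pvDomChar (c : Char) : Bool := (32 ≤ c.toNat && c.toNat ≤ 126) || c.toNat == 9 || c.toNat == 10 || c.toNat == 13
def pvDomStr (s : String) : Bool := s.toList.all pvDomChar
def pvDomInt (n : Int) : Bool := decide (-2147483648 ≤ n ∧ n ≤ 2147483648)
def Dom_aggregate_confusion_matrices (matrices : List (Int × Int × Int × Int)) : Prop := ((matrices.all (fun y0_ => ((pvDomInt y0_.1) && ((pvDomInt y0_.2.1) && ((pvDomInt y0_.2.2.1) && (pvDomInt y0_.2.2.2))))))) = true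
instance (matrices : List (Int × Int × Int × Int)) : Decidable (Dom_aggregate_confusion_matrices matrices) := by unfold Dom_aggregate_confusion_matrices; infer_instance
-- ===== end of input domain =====

-- B replaces A's single accumulating loop by divide-and-conquer halving (alternative decomposition, same result).

-- ===== PORT A =====
-- Literal port of A: one left fold maintaining the four running totals.
def aggregate_confusion_matrices (matrices : List (Int × Int × Int × Int)) : Int × Int × Int × Int :=
  matrices.foldl
    (fun (acc : Int × Int × Int × Int) (m : Int × Int × Int × Int) =>
      (acc.1 + m.1, acc.2.1 + m.2.1, acc.2.2.1 + m.2.2.1, acc.2.2.2 + m.2.2.2))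
    (0, 0, 0, 0)

-- ===== PORT B =====
-- Port of B's recursive helper go(lo, hi): here the sublist matrices[lo:hi] is the argument,
-- split at its midpoint exactly as Source B splits the index range.
def aggAltGo (ms : List (Int × Int × Int × Int)) : Int × Int × Int × Int :=
  if h1 : ms.length = 0 then (0, 0, 0, 0)
  else if h2 : ms.length = 1 then
    match ms with
    | m :: _ => m
    | [] => (0, 0, 0, 0)
  else
    let mid := ms.length / 2
    let l := aggAltGo (ms.take mid)
    let r := aggAltGo (ms.drop mid)
    (l.1 + r.1, l.2.1 + r.2.1, l.2.2.1 + r.2.2.1, l.2.2.2 + r.2.2.2)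
termination_by ms.length
decreasing_by
  · simp only [List.length_take]; omega
  · simp only [List.length_drop]; omega

def aggregate_confusion_matrices_alt (matrices : List (Int × Int × Int × Int)) : Int × Int × Int × Int :=
  aggAltGo matrices

-- ===== PRECONDITION & SPEC =====
def Spec_aggregate_confusion_matrices (matrices : List (Int × Int × Int × Int)) (out : Int × Int × Int × Int) : Prop := out = aggregate_confusion_matrices_alt matrices
instance (matrices : List (Int × Int × Int × Int)) (out : Int × Int × Int × Int) : Decidable (Spec_aggregate_confusion_matrices matrices out) := by unfold Spec_aggregate_confusion_matrices; infer_instance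

-- ===== CLAIM (what is proved, stated in full; the proofs are below) =====
def Claim_equal_aggregate_confusion_matrices : Prop := ∀ (matrices : List (Int × Int × Int × Int)), Dom_aggregate_confusion_matrices matrices → Spec_aggregate_confusion_matrices matrices (aggregate_confusion_matrices matrices)

-- ===== LEMMAS AND PROOFS =====
-- The componentwise sum of the four columns: the common value of both ports.
def sumQuad (ms : List (Int × Int × Int × Int)) : Int × Int × Int × Int :=
  ((ms.map (fun m => m.1)).sum, (ms.map (fun m => m.2.1)).sum,
   (ms.map (fun m => m.2.2.1)).sum, (ms.map (fun m => m.2.2.2)).sum)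

theorem sumQuad_append (l r : List (Int × Int × Int × Int)) :
    sumQuad (l ++ r) =
      ((sumQuad l).1 + (sumQuad r).1, (sumQuad l).2.1 + (sumQuad r).2.1,
       (sumQuad l).2.2.1 + (sumQuad r).2.2.1, (sumQuad l).2.2.2 + (sumQuad r).2.2.2) := by
  simp [sumQuad]

theorem aggAltGo_eq_aux (n : Nat) : ∀ ms : List (Int × Int × Int × Int),
    ms.length ≤ n → aggAltGo ms = sumQuad ms := by
  induction n with
  | zero =>
    intro ms h
    have h0 : ms.length = 0 := by omega
    rw [aggAltGo]
    simp only [h0, dite_true]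
    cases ms with
    | nil => simp [sumQuad]
    | cons x xs => simp at h0
  | succ n ih =>
    intro ms h
    rw [aggAltGo]
    split_ifs with h1 h2
    · cases ms with
      | nil => simp [sumQuad]
      | cons x xs => simp at h1
    · cases ms with
      | nil => simp at h2
      | cons x xs =>
        cases xs with
        | nil => simp [sumQuad]
        | cons y ys => simp at h2
    · have hl : (ms.take (ms.length / 2)).length ≤ n := by
        simp only [List.length_take]; omega
      have hr : (ms.drop (ms.length / 2)).length ≤ n := by
        simp only [List.length_drop]; omega
      simp only [ih _ hl, ih _ hr]
      conv_rhs => rw [(List.take_append_drop (ms.length / 2) ms).symm]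
      rw [sumQuad_append]

theorem aggAltGo_eq (ms : List (Int × Int × Int × Int)) : aggAltGo ms = sumQuad ms :=
  aggAltGo_eq_aux ms.length ms (le_refl _)

theorem foldA_eq (ms : List (Int × Int × Int × Int)) (a b c d : Int) :
    ms.foldl
      (fun (acc : Int × Int × Int × Int) (m : Int × Int × Int × Int) =>
        (acc.1 + m.1, acc.2.1 + m.2.1, acc.2.2.1 + m.2.2.1, acc.2.2.2 + m.2.2.2))
      (a, b, c, d)
    = (a + (sumQuad ms).1, b + (sumQuad ms).2.1, c + (sumQuad ms).2.2.1, d + (sumQuad ms).2.2.2) := by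
  induction ms generalizing a b c d with
  | nil => simp [sumQuad]
  | cons x xs ih => simp only [List.foldl, sumQuad, List.map, List.sum_cons, ih]; ring_nf

-- ===== VERDICT (by name: the statement is the Claim_ definition above) =====
theorem aggregate_confusion_matrices_spec : Claim_equal_aggregate_confusion_matrices := by
  intro ms _
  unfold Spec_aggregate_confusion_matrices aggregate_confusion_matrices aggregate_confusion_matrices_alt
  rw [aggAltGo_eq, foldA_eq]
  simp
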